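-- pv_equiv track=rewrite | github.com/nickaigi/automatic-dollop | arcade_solutions/the_core/square_digits_sequence.py | square_digits_sequence_other
-- ===== SOURCE A (Python) =====
-- def square_digits_sequence_other(a0):
--     result = []
--     x = a0
--
--     while x not in result:
--         result.append(x)
--         count = 0
--         for _ in str(x):
--             count += int(_) ** 2
--         x = count
--     return len(result) + 1
-- ===== SOURCE B (Python) =====
-- # Different algorithm: instead of storing every value and scanning a growing list,
-- # walk the orbit in O(1) memory counting steps until it enters one of the known
-- # terminal cycles of the digit-square-sum map (the fixed points 0 and 1, or the
-- # classic 8-cycle 4,16,37,58,89,145,42,20), then add that cycle's length.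
-- _CYCLE8 = (4, 16, 37, 58, 89, 145, 42, 20)
--
-- def square_digits_sequence_other(a0):
--     x = a0
--     steps = 0
--     while x != 0 and x != 1 and x not in _CYCLE8:
--         count = 0
--         for d in str(x):
--             count += int(d) ** 2
--         x = count
--         steps += 1
--     return steps + (1 if x == 0 or x == 1 else 8) + 1
-- ===== Notes on version B (the rewrite author's own statement) =====
-- stated objective: alternative
-- what changed: A stores every orbit value in a list and rescans it for membership each iteration; B keeps no history at all, walking the orbit in O(1) memory while counting steps until it hits a known terminal cycle of the digit-square-sum map (the fixed points 0 and 1 or the 8-cycle 4,16,37,58,89,145,42,20) and adding that cycle's length.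
import Mathlib
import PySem

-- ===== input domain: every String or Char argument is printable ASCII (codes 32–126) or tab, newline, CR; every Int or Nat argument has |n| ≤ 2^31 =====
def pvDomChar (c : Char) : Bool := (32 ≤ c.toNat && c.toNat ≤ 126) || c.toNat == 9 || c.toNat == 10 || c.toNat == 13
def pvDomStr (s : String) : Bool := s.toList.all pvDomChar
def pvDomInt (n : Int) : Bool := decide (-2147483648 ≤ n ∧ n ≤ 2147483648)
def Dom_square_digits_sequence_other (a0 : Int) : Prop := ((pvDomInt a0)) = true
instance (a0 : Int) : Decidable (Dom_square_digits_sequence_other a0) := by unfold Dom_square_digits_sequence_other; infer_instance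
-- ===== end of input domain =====

-- B replaces A's grow-a-list-and-rescan loop by an O(1)-memory walk that counts steps
-- until the orbit enters a known terminal cycle of the digit-square-sum map.

-- ===== PORT A =====
-- shared inner loop `for _ in str(x): count += int(_) ** 2` (textually identical in A and B);
-- int(_) is PySem.Int.ofChars? on the one-char string; `.getD 0` is unreachable on Pre_
-- (str(x) of a nonnegative int has only digit chars, where ofChars? is some)
def sqsum (x : Int) : Int :=
  (PySem.Int.toChars x).foldl (fun count c => count + ((PySem.Int.ofChars? [c]).getD 0) ^ 2) 0

-- A's while-loop; fuel only makes the recursion total, it is never exhausted on Pre_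
-- (the fuel-0 value mirrors the loop exit so that lemmas stay uniform; it is unreachable)
def aLoop : Nat → List Int → Int → Int
  | 0, result, _ => result.length + 1
  | fuel + 1, result, x =>
    if x ∈ result then result.length + 1
    else aLoop fuel (result ++ [x]) (sqsum x)

def square_digits_sequence_other (a0 : Int) : Int := aLoop 1000 [] a0

-- ===== PORT B =====
-- B's while-loop: count steps until x is 0, 1 or in the 8-cycle (same unreachable fuel)
def bLoop : Nat → Int → Int → Int × Int
  | 0, steps, x => (steps, x)
  | fuel + 1, steps, x =>
    if x ≠ 0 ∧ x ≠ 1 ∧ x ∉ ([4, 16, 37, 58, 89, 145, 42, 20] : List Int) then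
      bLoop fuel (steps + 1) (sqsum x)
    else (steps, x)

def square_digits_sequence_other_alt (a0 : Int) : Int :=
  let p := bLoop 1000 0 a0
  p.1 + (if p.2 = 0 ∨ p.2 = 1 then 1 else 8) + 1

-- ===== PRECONDITION & SPEC =====
-- Pre_ excludes exactly the negative inputs, on which Python A raises ValueError
-- (int('-') on the sign character of str(x))
def Pre_square_digits_sequence_other (a0 : Int) : Prop := 0 ≤ a0
instance (a0 : Int) : Decidable (Pre_square_digits_sequence_other a0) := by unfold Pre_square_digits_sequence_other; infer_instance
def pvWitness_square_digits_sequence_other : Int := (5)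

def Spec_square_digits_sequence_other (a0 : Int) (out : Int) : Prop := out = square_digits_sequence_other_alt a0
instance (a0 : Int) (out : Int) : Decidable (Spec_square_digits_sequence_other a0 out) := by unfold Spec_square_digits_sequence_other; infer_instance

-- ===== CLAIM (what is proved, stated in full; the proofs are below) =====
def Claim_equal_square_digits_sequence_other : Prop := ∀ (a0 : Int), Dom_square_digits_sequence_other a0 → Pre_square_digits_sequence_other a0 → Spec_square_digits_sequence_other a0 (square_digits_sequence_other a0)

-- ===== LEMMAS AND PROOFS =====

-- the value B adds for the final cycle, as a function of the loop's exit state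
def bFinish (p : Int × Int) : Int := p.1 + (if p.2 = 0 ∨ p.2 = 1 then 1 else 8) + 1

lemma alt_eq_bFinish (a0 : Int) :
    square_digits_sequence_other_alt a0 = bFinish (bLoop 1000 0 a0) := rfl

-- every character of str(n) for n : Nat is a decimal digit character
lemma mem_toDigitsCore (f : Nat) : ∀ (n : Nat) (acc : List Char) (c : Char),
    c ∈ Nat.toDigitsCore 10 f n acc → c ∈ acc ∨ ∃ k, k < 10 ∧ c = Nat.digitChar k := by
  induction f with
  | zero => intro n acc c h; exact Or.inl h
  | succ f ih =>
    intro n acc c h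
    simp only [Nat.toDigitsCore] at h
    by_cases hz : n / 10 = 0
    · rw [if_pos hz] at h
      rcases List.mem_cons.1 h with h | h
      · exact Or.inr ⟨n % 10, Nat.mod_lt _ (by norm_num), h⟩
      · exact Or.inl h
    · rw [if_neg hz] at h
      rcases ih (n / 10) ((n % 10).digitChar :: acc) c h with h' | h'
      · rcases List.mem_cons.1 h' with h' | h'
        · exact Or.inr ⟨n % 10, Nat.mod_lt _ (by norm_num), h'⟩
        · exact Or.inl h'
      · exact Or.inr h'

-- reading one digit character back gives a value in [0, 9]
lemma digitChar_val (k : Nat) (hk : k < 10) :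
    0 ≤ (PySem.Int.ofChars? [Nat.digitChar k]).getD 0 ∧
      (PySem.Int.ofChars? [Nat.digitChar k]).getD 0 ≤ 9 := by
  interval_cases k <;> exact ⟨by decide, by decide⟩

-- generic bound for the inner fold
lemma foldl_sq_le (l : List Char) (acc : Int)
    (h : ∀ c ∈ l, 0 ≤ (PySem.Int.ofChars? [c]).getD 0 ∧ (PySem.Int.ofChars? [c]).getD 0 ≤ 9) :
    l.foldl (fun count c => count + ((PySem.Int.ofChars? [c]).getD 0) ^ 2) acc ≤ acc + 81 * l.length := by
  induction l generalizing acc with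
  | nil => simp
  | cons c l ih =>
    have hc := h c (by simp)
    have hsq : ((PySem.Int.ofChars? [c]).getD 0) ^ 2 ≤ 81 := by nlinarith [hc.1, hc.2]
    have := ih (acc + ((PySem.Int.ofChars? [c]).getD 0) ^ 2) (fun c hc => h c (by simp [hc]))
    simp only [List.foldl_cons, List.length_cons]
    push_cast
    linarith

lemma foldl_sq_nonneg (l : List Char) (acc : Int) (hacc : 0 ≤ acc) :
    0 ≤ l.foldl (fun count c => count + ((PySem.Int.ofChars? [c]).getD 0) ^ 2) acc := by
  induction l generalizing acc with
  | nil => simpa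
  | cons c l ih => exact ih _ (by positivity)

lemma sqsum_nonneg (x : Int) : 0 ≤ sqsum x := foldl_sq_nonneg _ _ le_rfl

-- structural bound: any nonnegative x ≤ 2^31 (at most 10 decimal digits) has sqsum x ≤ 810
lemma sqsum_le_810 (x : Int) (h0 : 0 ≤ x) (h1 : x ≤ 2147483648) : sqsum x ≤ 810 := by
  have hx : PySem.Int.toChars x = Nat.toDigits 10 x.toNat := by
    simp [PySem.Int.toChars, not_lt.2 h0]
  have hlen : (Nat.toDigits 10 x.toNat).length ≤ 10 := by
    refine Nat.toDigits_length 10 x.toNat 10 (by norm_num) ?_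
    have : x.toNat ≤ 2147483648 := by omega
    omega
  have hdig : ∀ c ∈ Nat.toDigits 10 x.toNat,
      0 ≤ (PySem.Int.ofChars? [c]).getD 0 ∧ (PySem.Int.ofChars? [c]).getD 0 ≤ 9 := by
    intro c hc
    rcases mem_toDigitsCore _ _ _ _ hc with h | ⟨k, hk, rfl⟩
    · simp at h
    · exact digitChar_val k hk
  have := foldl_sq_le (Nat.toDigits 10 x.toNat) 0 hdig
  have hlen' : (81 : Int) * (Nat.toDigits 10 x.toNat).length ≤ 810 := by
    have : ((Nat.toDigits 10 x.toNat).length : Int) ≤ 10 := by exact_mod_cast hlen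
    linarith
  calc sqsum x = (Nat.toDigits 10 x.toNat).foldl
        (fun count c => count + ((PySem.Int.ofChars? [c]).getD 0) ^ 2) 0 := by rw [sqsum, hx]
    _ ≤ 0 + 81 * (Nat.toDigits 10 x.toNat).length := this
    _ ≤ 810 := by omega

-- decided range bounds for sqsum on small values
set_option maxRecDepth 100000 in
set_option maxHeartbeats 1000000 in
lemma sqsum_small : ∀ n ∈ List.range 811,
    sqsum (n : Int) ≤ 243 ∧ ((n : Int) ≤ 243 → sqsum (n : Int) ≤ 163) := by decide

lemma sqsum_le_of_le (x : Int) (h0 : 0 ≤ x) :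
    (x ≤ 163 → sqsum x ≤ 163) ∧ (x ≤ 243 → sqsum x ≤ 163) ∧ (x ≤ 810 → sqsum x ≤ 243) := by
  constructor
  · intro h
    have := sqsum_small x.toNat (by simp [List.mem_range]; omega)
    rw [Int.toNat_of_nonneg h0] at this
    exact this.2 (by omega)
  constructor
  · intro h
    have := sqsum_small x.toNat (by simp [List.mem_range]; omega)
    rw [Int.toNat_of_nonneg h0] at this
    exact this.2 (by omega)
  · intro h
    have := sqsum_small x.toNat (by simp [List.mem_range]; omega)
    rw [Int.toNat_of_nonneg h0] at this
    exact this.1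

-- the orbit of sqsum from any y with 0 ≤ y ≤ b (b ∈ {163, 243, 810}) stays within [0, b]
lemma orbit_bound (b : Int) (hb : b = 163 ∨ b = 243 ∨ b = 810) :
    ∀ (k : Nat) (y : Int), 0 ≤ y → y ≤ b → 0 ≤ sqsum^[k] y ∧ sqsum^[k] y ≤ b := by
  intro k
  induction k with
  | zero => intro y h0 h1; simpa using ⟨h0, h1⟩
  | succ k ih =>
    intro y h0 h1
    rw [Function.iterate_succ_apply]
    refine ih _ (sqsum_nonneg y) ?_
    rcases hb with rfl | rfl | rfl
    · exact (sqsum_le_of_le y h0).1 h1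
    · have := (sqsum_le_of_le y h0).2.1 h1; omega
    · have := (sqsum_le_of_le y h0).2.2 h1; omega

-- values already in `result` that the orbit never revisits only shift A's count
lemma aLoop_append (fuel : Nat) : ∀ (r1 r2 : List Int) (x : Int),
    (∀ k : Nat, sqsum^[k] x ∉ r1) →
    aLoop fuel (r1 ++ r2) x = r1.length + aLoop fuel r2 x := by
  induction fuel with
  | zero => intro r1 r2 x _; simp [aLoop]; ring
  | succ fuel ih =>
    intro r1 r2 x h
    have hx : x ∉ r1 := by simpa using h 0
    by_cases hm : x ∈ r2
    · simp [aLoop, hm, hx]; ring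
    · have hmem : x ∉ r1 ++ r2 := by simp [hx, hm]
      rw [aLoop, if_neg hmem, aLoop, if_neg hm, List.append_assoc]
      exact ih r1 (r2 ++ [x]) (sqsum x)
        (fun k => by simpa [Function.iterate_succ_apply] using h (k + 1))

-- B's step counter is a pure accumulator
lemma bLoop_shift (fuel : Nat) : ∀ (s x : Int),
    bLoop fuel s x = (s + (bLoop fuel 0 x).1, (bLoop fuel 0 x).2) := by
  induction fuel with
  | zero => intro s x; simp [bLoop]
  | succ fuel ih =>
    intro s x
    by_cases hc : x ≠ 0 ∧ x ≠ 1 ∧ x ∉ ([4, 16, 37, 58, 89, 145, 42, 20] : List Int)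
    · rw [bLoop, if_pos hc, bLoop, if_pos hc, ih (s + 1), ih (0 + 1)]
      simp only [Prod.mk.injEq]
      exact ⟨by ring, trivial⟩
    · rw [bLoop, if_neg hc, bLoop, if_neg hc]; simp

lemma bFinish_shift (s : Int) (p : Int × Int) :
    bFinish (s + p.1, p.2) = s + bFinish p := by
  simp only [bFinish]; ring

-- how many peeling steps x may need before it is ≤ 163
def phi (x : Int) : Nat := if x ≤ 163 then 0 else if x ≤ 243 then 1 else if x ≤ 810 then 2 else 3

-- one step down the threshold ladder
lemma phi_step (x : Int) (h0 : 0 ≤ x) (h1 : x ≤ 2147483648) (hx : 164 ≤ x) :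
    phi (sqsum x) + 1 ≤ phi x := by
  have hnn := sqsum_nonneg x
  by_cases h2 : x ≤ 243
  · have := (sqsum_le_of_le x h0).2.1 h2
    unfold phi; split_ifs <;> omega
  · by_cases h3 : x ≤ 810
    · have := (sqsum_le_of_le x h0).2.2 h3
      unfold phi; split_ifs <;> omega
    · have := sqsum_le_810 x h0 h1
      unfold phi; split_ifs <;> omega

-- strict decrease above the last threshold
lemma sqsum_lt (x : Int) (h0 : 0 ≤ x) (h1 : x ≤ 2147483648) (hx : 164 ≤ x) :
    sqsum x < x := by
  by_cases h2 : x ≤ 243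
  · have := (sqsum_le_of_le x h0).2.1 h2; omega
  · by_cases h3 : x ≤ 810
    · have := (sqsum_le_of_le x h0).2.2 h3; omega
    · have := sqsum_le_810 x h0 h1; omega

-- for x ≥ 164 the orbit after x never returns to x
lemma orbit_ne (x : Int) (h0 : 0 ≤ x) (h1 : x ≤ 2147483648) (hx : 164 ≤ x) :
    ∀ k : Nat, sqsum^[k] (sqsum x) ≠ x := by
  intro k
  by_cases h2 : x ≤ 243
  · have hs := (sqsum_le_of_le x h0).2.1 h2
    have := orbit_bound 163 (Or.inl rfl) k (sqsum x) (sqsum_nonneg x) hs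
    omega
  · by_cases h3 : x ≤ 810
    · have hs := (sqsum_le_of_le x h0).2.2 h3
      have := orbit_bound 243 (Or.inr (Or.inl rfl)) k (sqsum x) (sqsum_nonneg x) hs
      omega
    · have hs := sqsum_le_810 x h0 h1
      have := orbit_bound 810 (Or.inr (Or.inr rfl)) k (sqsum x) (sqsum_nonneg x) hs
      omega

-- base cases: all start values ≤ 163, at each fuel the peeling can leave behind
set_option maxRecDepth 100000 in
set_option maxHeartbeats 4000000 in
lemma base_cases : ∀ n ∈ List.range 164, ∀ fuel ∈ [997, 998, 999, 1000],
    aLoop fuel [] (n : Int) = bFinish (bLoop fuel 0 (n : Int)) := by decide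

-- main induction: peel while x ≥ 164 (each peel strictly decreases x), decide below
lemma main_ind : ∀ (n : Nat) (x : Int), x.toNat = n → 0 ≤ x → x ≤ 2147483648 →
    ∀ fuel : Nat, 997 + phi x ≤ fuel → fuel ≤ 1000 →
    aLoop fuel [] x = bFinish (bLoop fuel 0 x) := by
  intro n
  induction n using Nat.strong_induction_on with
  | _ n ih =>
    intro x hxn h0 h1 fuel hf1 hf2
    by_cases hsmall : x ≤ 163
    · have hfuel : fuel ∈ [997, 998, 999, 1000] := by
        have := hf1; unfold phi at this; simp [hsmall] at this
        simp; omega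
      have := base_cases x.toNat (by simp [List.mem_range]; omega) fuel hfuel
      rwa [Int.toNat_of_nonneg h0] at this
    · have hx : 164 ≤ x := by omega
      obtain ⟨f, rfl⟩ : ∃ f, fuel = f + 1 := ⟨fuel - 1, by omega⟩
      -- peel A
      have hA : aLoop (f + 1) [] x = 1 + aLoop f [] (sqsum x) := by
        rw [aLoop, if_neg (by simp)]
        have := aLoop_append f [x] [] (sqsum x)
          (fun k => by simpa using orbit_ne x h0 h1 hx k)
        simpa using this
      -- peel B
      have hcond : x ≠ 0 ∧ x ≠ 1 ∧ x ∉ ([4, 16, 37, 58, 89, 145, 42, 20] : List Int) := by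
        refine ⟨by omega, by omega, ?_⟩
        simp; omega
      have hB : bFinish (bLoop (f + 1) 0 x) = 1 + bFinish (bLoop f 0 (sqsum x)) := by
        rw [bLoop, if_pos hcond]
        simp only [zero_add]
        rw [bLoop_shift f 1 (sqsum x), bFinish_shift]
      rw [hA, hB]
      have hlt : (sqsum x).toNat < n := by
        have := sqsum_lt x h0 h1 hx
        have := sqsum_nonneg x
        omega
      have := ih (sqsum x).toNat hlt (sqsum x) rfl (sqsum_nonneg x)
        (by have := sqsum_le_810 x h0 h1; omega) f
        (by have := phi_step x h0 h1 hx; omega) (by omega)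
      omega

-- ===== VERDICT (by name: the statement is the Claim_ definition above) =====
theorem square_digits_sequence_other_spec : Claim_equal_square_digits_sequence_other := by
  intro a0 hdom hpre
  have hdom' : -2147483648 ≤ a0 ∧ a0 ≤ 2147483648 := by
    simpa [Dom_square_digits_sequence_other, pvDomInt] using hdom
  have := main_ind a0.toNat a0 rfl hpre hdom'.2 1000
    (by have : phi a0 ≤ 3 := by unfold phi; split_ifs <;> omega
        omega) le_rfl
  unfold Spec_square_digits_sequence_other square_digits_sequence_other
  rw [alt_eq_bFinish]
  exact this
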